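-- pv_equiv track=rewrite | github.com/matheusvirissimo/calculadora-ipv6 | calculadora_ipv6.py | abreviar_ipv6
-- ===== SOURCE A (Python) =====
-- def abreviar_ipv6(partes_normalizadas):
--     """Abrevia um endereço IPv6 normalizado de acordo com as regras da RFC 4193
--
--     Esta função implementa três regras de abreviação:
--     1. Remove zeros à esquerda de cada bloco
--     2. Encontra a maior sequência de blocos de zero e a substitui por '::'
--     3. Não comete ambiguidade
--
--     Parâmetros
--     ----------
--     partes_normalizadas : list
--         Uma lista com os 8 blocos de 4 dígitos de um endereço IPv6
--
--     Retorna
--     -------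
--     str
--         O endereço IPv6 abreviado.
--         Ex: "2801:390:80:0:100::ff00"
--     """
--     # Encontrar a maior sequência de blocos de zero ('0000')
--     maior_sequencia_inicio = -1
--     maior_sequencia_tamanho = 0
--     sequencia_atual_inicio = -1
--     sequencia_atual_tamanho = 0
--
--     # Itera pelos blocos para encontrar a sequência mais longa de '0000'
--     for i, parte in enumerate(partes_normalizadas):
--         if parte == '0000':
--             if sequencia_atual_tamanho == 0:
--                 sequencia_atual_inicio = i
--             sequencia_atual_tamanho += 1
--         else:
--             if sequencia_atual_tamanho > maior_sequencia_tamanho: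
--                 maior_sequencia_tamanho = sequencia_atual_tamanho
--                 maior_sequencia_inicio = sequencia_atual_inicio
--             sequencia_atual_tamanho = 0
--
--     # Verifica a última sequência após o loop terminar
--     if sequencia_atual_tamanho > maior_sequencia_tamanho:
--         maior_sequencia_tamanho = sequencia_atual_tamanho
--         maior_sequencia_inicio = sequencia_atual_inicio
--
--     # Remove os zeros à esquerda de cada bloco
--     # Ex: '0390' vira '390', '0000' vira '0'
--     partes_sem_zeros_esquerda = [parte.lstrip('0') or '0' for parte in partes_normalizadas]
--
--     # Se encontramos uma sequência de zeros com mais de 1 bloco, aplicamos a regra '::'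
--     if maior_sequencia_tamanho > 1:
--         inicio = maior_sequencia_inicio
--         fim = inicio + maior_sequencia_tamanho
--
--         # Monta o endereço abreviado
--         parte_esquerda = partes_sem_zeros_esquerda[:inicio]
--         parte_direita = partes_sem_zeros_esquerda[fim:]
--
--         # Junta as partes com '::' no meio
--         # A lógica `"::".join([...])` lida com casos onde uma das partes é vazia
--         # Ex: ::1 (parte_esquerda é vazia) ou 1:: (parte_direita é vazia)
--         endereco_abreviado = ":".join(parte_esquerda) + "::" + ":".join(parte_direita)
--     else:
--         # Se não há sequência de zeros para abreviar, apenas juntamos com ':'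
--         endereco_abreviado = ":".join(partes_sem_zeros_esquerda)
--
--     return endereco_abreviado
-- ===== SOURCE B (Python) =====
-- def abreviar_ipv6(partes_normalizadas):
--     # Strip leading zeros from every block ('0000' -> '0')
--     blocos = [parte.lstrip('0') or '0' for parte in partes_normalizadas]
--
--     # Suffix DP: runlen[i] = length of the run of '0000' blocks starting at i
--     # (built back-to-front, one sentinel 0 at the end)
--     runlen = [0]
--     for parte in reversed(partes_normalizadas):
--         runlen.append(runlen[-1] + 1 if parte == '0000' else 0)
--     runlen.reverse()
--
--     # The maximum of runlen is the longest run length; its FIRST index is the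
--     # start of the first longest run (values inside a run strictly descend).
--     best = max(runlen)
--     if best > 1:
--         inicio = runlen.index(best)
--         return ":".join(blocos[:inicio]) + "::" + ":".join(blocos[inicio + best:])
--     return ":".join(blocos)
-- ===== Notes on version B (the rewrite author's own statement) =====
-- stated objective: alternative
-- what changed: A finds the longest zero-run with an inline forward scan carrying four scalar state variables plus a post-loop fixup; B instead computes a suffix DP array runlen[i] = length of the '0000'-run starting at i (backward pass) and locates the splice point with max(runlen) and runlen.index(best), with no run bookkeeping.
import Mathlib
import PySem

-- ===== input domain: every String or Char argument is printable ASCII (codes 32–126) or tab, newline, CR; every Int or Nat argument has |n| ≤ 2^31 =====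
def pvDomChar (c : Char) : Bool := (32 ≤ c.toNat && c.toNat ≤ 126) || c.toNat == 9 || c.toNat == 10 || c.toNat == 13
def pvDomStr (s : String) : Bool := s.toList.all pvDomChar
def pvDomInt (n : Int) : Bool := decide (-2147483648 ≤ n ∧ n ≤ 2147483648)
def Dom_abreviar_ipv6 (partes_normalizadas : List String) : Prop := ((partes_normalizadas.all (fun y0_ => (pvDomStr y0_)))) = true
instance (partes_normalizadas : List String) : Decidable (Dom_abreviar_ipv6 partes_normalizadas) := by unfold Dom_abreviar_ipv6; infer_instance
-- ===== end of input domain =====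

-- B replaces A's inline forward scan (four scalar state variables plus a post-loop fixup)
-- by a suffix DP: runlen[i] = length of the '0000'-run starting at block i, built in one
-- backward pass, with max(runlen)/runlen.index locating the splice; objective: alternative
-- algorithm, same cost.

-- shared helper: parte.lstrip('0') or '0'  (lstrip('0') is exactly dropWhile (= '0') on the code points)
def pvStrip (parte : String) : String :=
  let s := String.ofList (parte.toList.dropWhile (· == '0'))
  if s == "" then "0" else s

-- ===== PORT A =====
-- loop body of A: state (maior_inicio, maior_tamanho, atual_inicio, atual_tamanho)
def pvStepA (s : Int × Int × Int × Int) (ip : Int × String) : Int × Int × Int × Int :=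
  if ip.2 == "0000" then
    (s.1, s.2.1, (if s.2.2.2 == 0 then ip.1 else s.2.2.1), s.2.2.2 + 1)
  else
    if s.2.2.2 > s.2.1 then (s.2.2.1, s.2.2.2, s.2.2.1, 0)
    else (s.1, s.2.1, s.2.2.1, 0)

-- A's check of the last sequence after the loop
def pvFin (s : Int × Int × Int × Int) : Int × Int :=
  if s.2.2.2 > s.2.1 then (s.2.2.1, s.2.2.2) else (s.1, s.2.1)

def abreviar_ipv6 (partes_normalizadas : List String) : String :=
  let st := (PySem.List.enumerate partes_normalizadas).foldl pvStepA (-1, 0, -1, 0)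
  let st2 := pvFin st
  let partes_sem_zeros_esquerda := partes_normalizadas.map pvStrip
  if st2.2 > 1 then
    let inicio := st2.1
    let fim := inicio + st2.2
    PySem.Str.join ":" (PySem.List.slice partes_sem_zeros_esquerda none (some inicio)) ++ "::" ++
      PySem.Str.join ":" (PySem.List.slice partes_sem_zeros_esquerda (some fim) none)
  else
    PySem.Str.join ":" partes_sem_zeros_esquerda

-- ===== PORT B =====
-- Source B's backward loop over reversed(partes) + reverse(): the suffix list of run lengths,
-- runlen[i] = runlen[i+1] + 1 if block i is '0000' else 0, with sentinel 0 at the end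
def pvRunlen : List String → List Int
  | [] => [0]
  | parte :: resto =>
    let r := pvRunlen resto
    (if parte == "0000" then r.headI + 1 else 0) :: r

def abreviar_ipv6_alt (partes_normalizadas : List String) : String :=
  let blocos := partes_normalizadas.map pvStrip
  let runlen := pvRunlen partes_normalizadas
  let best := (PySem.List.max? runlen (fun x => x)).getD 0      -- max(runlen); runlen is never empty
  if best > 1 then
    let inicio : Int := ((PySem.List.index? runlen best).getD 0 : Nat)   -- runlen.index(best)
    PySem.Str.join ":" (PySem.List.slice blocos none (some inicio)) ++ "::" ++
      PySem.Str.join ":" (PySem.List.slice blocos (some (inicio + best)) none)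
  else
    PySem.Str.join ":" blocos

-- ===== PRECONDITION & SPEC =====
def Spec_abreviar_ipv6 (partes_normalizadas : List String) (out : String) : Prop := out = abreviar_ipv6_alt partes_normalizadas
instance (partes_normalizadas : List String) (out : String) : Decidable (Spec_abreviar_ipv6 partes_normalizadas out) := by unfold Spec_abreviar_ipv6; infer_instance

-- ===== CLAIM (what is proved, stated in full; the proofs are below) =====
def Claim_equal_abreviar_ipv6 : Prop := ∀ (partes_normalizadas : List String), Dom_abreviar_ipv6 partes_normalizadas → Spec_abreviar_ipv6 partes_normalizadas (abreviar_ipv6 partes_normalizadas)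

-- ===== LEMMAS AND PROOFS =====

-- first-longest pick (strictly-greater replaces)
def pvPick (b : Int × Int) (r : Int × Int) : Int × Int :=
  if r.2 > b.2 then r else b

-- (h, m̄, k̄): h = length of the head run of '0000' blocks; m̄ = longest run NOT starting at
-- index 0; k̄ = start index of the first such longest run (0 when m̄ = 0)
def pvT : List String → Int × Int × Nat
  | [] => (0, 0, 0)
  | x :: xs =>
    let t := pvT xs
    if x == "0000" then (t.1 + 1, t.2.1, if t.2.1 = 0 then 0 else t.2.2 + 1)
    else (0, max t.1 t.2.1, if max t.1 t.2.1 = 0 then 0 else (if t.2.1 ≤ t.1 then 0 else t.2.2) + 1)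

lemma pvT_nonneg (l : List String) : 0 ≤ (pvT l).1 ∧ 0 ≤ (pvT l).2.1 := by
  induction l with
  | nil => exact ⟨le_rfl, le_rfl⟩
  | cons x xs ih =>
    simp only [pvT]
    split <;> constructor <;> simp <;> omega

lemma pvRunlen_ne_nil (l : List String) : pvRunlen l ≠ [] := by
  cases l <;> simp [pvRunlen]

lemma pvPick_zero (b : Int × Int) (z : Int) (hb : 0 ≤ b.2) : pvPick b (z, 0) = b := by
  unfold pvPick
  rw [if_neg (by omega)]

lemma pvPick_snd_nonneg (b r : Int × Int) (hb : 0 ≤ b.2) (hr : 0 ≤ r.2) : 0 ≤ (pvPick b r).2 := by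
  unfold pvPick
  split <;> assumption

-- combining the two suffix candidates into the first-longest of the whole suffix
lemma pvPick2 (b : Int × Int) (i h mb : Int) (kb : Nat) (hb : 0 ≤ b.2) (_hh : 0 ≤ h) (hm : 0 ≤ mb) :
    pvPick (pvPick b (i + 1, h)) (i + 1 + (kb : Int), mb) =
      pvPick b (i + ((if max h mb = 0 then 0 else (if mb ≤ h then 0 else kb) + 1 : Nat) : Int), max h mb) := by
  obtain ⟨bi, bv⟩ := b
  simp only [pvPick] at *
  split_ifs <;> simp_all <;> omega

-- A's scan state, characterised by the suffix data pvT
lemma pv_scan (l : List String) : ∀ (i bs bl cs cl : Int), 0 ≤ bl → 0 ≤ cl → (0 < cl → cs + cl = i) →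
    pvFin ((PySem.List.enumerate l i).foldl pvStepA (bs, bl, cs, cl)) =
      pvPick (pvPick (bs, bl) (if cl = 0 then i else cs, cl + (pvT l).1))
             (i + ((pvT l).2.2 : Int), (pvT l).2.1) := by
  induction l with
  | nil =>
    intro i bs bl cs cl hbl hcl hp
    simp only [PySem.List.enumerate_nil, List.foldl_nil, pvT, Nat.cast_zero, add_zero]
    rw [pvPick_zero _ _ (pvPick_snd_nonneg _ _ (by simpa using hbl) (by simpa using hcl))]
    simp only [pvFin, pvPick]
    by_cases hg : bl < cl
    · rw [if_pos hg, if_pos hg, if_neg (by omega)]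
    · rw [if_neg hg, if_neg hg]
  | cons x xs ih =>
    intro i bs bl cs cl hbl hcl hp
    rw [PySem.List.enumerate_cons, List.foldl_cons]
    by_cases hx : x = "0000"
    · set cs' := (if cl = 0 then i else cs) with hcs'
      have hA : pvStepA (bs, bl, cs, cl) (i, x) = (bs, bl, cs', cl + 1) := by
        rw [hcs']
        simp [pvStepA, hx]
      rw [hA]
      have hih := ih (i + 1) bs bl cs' (cl + 1) hbl (by omega)
        (by intro _
            by_cases h0 : cl = 0
            · rw [hcs', if_pos h0]; omega
            · rw [hcs', if_neg h0]; have := hp (by omega); omega)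
      rw [if_neg (show ¬(cl + 1 = 0) by omega)] at hih
      rw [hih]
      have hT : pvT (x :: xs) = ((pvT xs).1 + 1, (pvT xs).2.1,
          if (pvT xs).2.1 = 0 then 0 else (pvT xs).2.2 + 1) := by
        simp [pvT, hx]
      rw [hT]
      dsimp only
      have harith : cl + 1 + (pvT xs).1 = cl + ((pvT xs).1 + 1) := by ring
      rw [harith]
      by_cases hm : (pvT xs).2.1 = 0
      · simp only [hm]
        rw [pvPick_zero _ _ (pvPick_snd_nonneg _ _ (by simpa using hbl)
              (by simp; have := (pvT_nonneg xs).1; omega)),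
            pvPick_zero _ _ (pvPick_snd_nonneg _ _ (by simpa using hbl)
              (by simp; have := (pvT_nonneg xs).1; omega))]
      · rw [if_neg hm]
        rw [show (((pvT xs).2.2 + 1 : Nat) : Int) = ((pvT xs).2.2 : Int) + 1 by push_cast; ring,
            show i + (((pvT xs).2.2 : Int) + 1) = i + 1 + ((pvT xs).2.2 : Int) by ring]
    · have hA : pvStepA (bs, bl, cs, cl) (i, x) =
          ((pvPick (bs, bl) (cs, cl)).1, (pvPick (bs, bl) (cs, cl)).2, cs, 0) := by
        by_cases hg : cl > bl <;> simp [pvStepA, pvPick, hx, hg]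
      rw [hA]
      have hb' : 0 ≤ (pvPick (bs, bl) (cs, cl)).2 :=
        pvPick_snd_nonneg _ _ (by simpa using hbl) (by simpa using hcl)
      have hih := ih (i + 1) (pvPick (bs, bl) (cs, cl)).1 (pvPick (bs, bl) (cs, cl)).2 cs 0
        hb' le_rfl (by omega)
      rw [if_pos rfl, zero_add, Prod.mk.eta] at hih
      rw [hih]
      have hT : pvT (x :: xs) = (0, max (pvT xs).1 (pvT xs).2.1,
          if max (pvT xs).1 (pvT xs).2.1 = 0 then 0
          else (if (pvT xs).2.1 ≤ (pvT xs).1 then 0 else (pvT xs).2.2) + 1) := by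
        simp [pvT, hx]
      rw [hT]
      dsimp only
      have hfirst : pvPick (bs, bl) (if cl = 0 then i else cs, cl + 0) = pvPick (bs, bl) (cs, cl) := by
        by_cases h0 : cl = 0
        · rw [if_pos h0, h0, add_zero]
          rw [pvPick_zero _ _ (by simpa using hbl), pvPick_zero _ _ (by simpa using hbl)]
        · rw [if_neg h0, add_zero]
      rw [hfirst]
      exact pvPick2 (pvPick (bs, bl) (cs, cl)) i (pvT xs).1 (pvT xs).2.1 (pvT xs).2.2
        hb' (pvT_nonneg xs).1 (pvT_nonneg xs).2

lemma pv_foldl_max (t : List Int) : ∀ (a b : Int), t.foldl max (max a b) = max a (t.foldl max b) := by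
  induction t with
  | nil => intro a b; rfl
  | cons c t ih =>
    intro a b
    simp only [List.foldl_cons, max_assoc]
    exact ih a (max b c)

-- B's runlen array, characterised by the same suffix data
lemma pv_rl (l : List String) :
    (pvRunlen l).headI = (pvT l).1 ∧
    PySem.List.max? (pvRunlen l) (fun x => x) = some (max (pvT l).1 (pvT l).2.1) ∧
    PySem.List.index? (pvRunlen l) (max (pvT l).1 (pvT l).2.1) =
      some (if (pvT l).2.1 ≤ (pvT l).1 then 0 else (pvT l).2.2) := by
  induction l with
  | nil => refine ⟨rfl, by decide, by decide⟩
  | cons x xs ih =>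
    obtain ⟨ihh, ihm, ihi⟩ := ih
    obtain ⟨hh0, hm0⟩ := pvT_nonneg xs
    obtain ⟨w, t, hwt⟩ : ∃ w t, pvRunlen xs = w :: t := by
      cases hrl : pvRunlen xs with
      | nil => exact absurd hrl (pvRunlen_ne_nil xs)
      | cons a b => exact ⟨_, _, rfl⟩
    have hw : w = (pvT xs).1 := by rw [hwt] at ihh; simpa using ihh
    have hfold : t.foldl max w = max (pvT xs).1 (pvT xs).2.1 := by
      rw [hwt, PySem.List.max?_id_cons] at ihm
      exact Option.some.inj ihm
    have hcons : pvRunlen (x :: xs) =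
        (if x == "0000" then (pvT xs).1 + 1 else 0) :: w :: t := by
      simp only [pvRunlen]
      rw [← hwt, ihh]
    by_cases hx : x = "0000"
    · have hT : pvT (x :: xs) = ((pvT xs).1 + 1, (pvT xs).2.1,
          if (pvT xs).2.1 = 0 then 0 else (pvT xs).2.2 + 1) := by simp [pvT, hx]
      rw [hcons, hT, if_pos (by simpa using hx)]
      dsimp only
      refine ⟨rfl, ?_, ?_⟩
      · rw [PySem.List.max?_id_cons, List.foldl_cons, pv_foldl_max, hfold]
        congr 1
        omega
      · by_cases hc : (pvT xs).2.1 ≤ (pvT xs).1 + 1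
        · rw [if_pos hc, show max ((pvT xs).1 + 1) (pvT xs).2.1 = (pvT xs).1 + 1 by omega]
          exact PySem.List.index?_cons_self _ _
        · rw [if_neg hc, show max ((pvT xs).1 + 1) (pvT xs).2.1 = (pvT xs).2.1 by omega]
          rw [PySem.List.index?_cons_of_ne (x := (pvT xs).1 + 1) (v := (pvT xs).2.1) (w :: t) (by omega)]
          rw [← hwt]
          rw [show max (pvT xs).1 (pvT xs).2.1 = (pvT xs).2.1 by omega] at ihi
          rw [ihi, if_neg (by omega)]
          simp only [Option.map_some]
          rw [if_neg (by omega)]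
    · have hT : pvT (x :: xs) = (0, max (pvT xs).1 (pvT xs).2.1,
          if max (pvT xs).1 (pvT xs).2.1 = 0 then 0
          else (if (pvT xs).2.1 ≤ (pvT xs).1 then 0 else (pvT xs).2.2) + 1) := by
        simp [pvT, hx]
      rw [hcons, hT, if_neg (by simpa using hx)]
      dsimp only
      refine ⟨rfl, ?_, ?_⟩
      · rw [PySem.List.max?_id_cons, List.foldl_cons, pv_foldl_max, hfold]
      · by_cases hM : max (pvT xs).1 (pvT xs).2.1 = 0
        · rw [show max 0 (max (pvT xs).1 (pvT xs).2.1) = 0 by omega,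
              if_pos (by omega)]
          exact PySem.List.index?_cons_self _ _
        · rw [show max 0 (max (pvT xs).1 (pvT xs).2.1) = max (pvT xs).1 (pvT xs).2.1 by omega,
              if_neg (by omega)]
          rw [PySem.List.index?_cons_of_ne (x := 0) (v := max (pvT xs).1 (pvT xs).2.1) (w :: t) (by omega),
              ← hwt, ihi]
          simp only [Option.map_some]
          rw [if_neg hM]

-- ===== VERDICT (by name: the statement is the Claim_ definition above) =====
theorem abreviar_ipv6_spec : Claim_equal_abreviar_ipv6 := by
  intro xs _
  show abreviar_ipv6 xs = abreviar_ipv6_alt xs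
  unfold abreviar_ipv6 abreviar_ipv6_alt
  obtain ⟨hh0, hm0⟩ := pvT_nonneg xs
  obtain ⟨hhead, hmax, hidx⟩ := pv_rl xs
  have hscan := pv_scan xs 0 (-1) 0 (-1) 0 le_rfl le_rfl (by omega)
  rw [if_pos rfl, zero_add, zero_add] at hscan
  have hsnd : (pvPick (pvPick (-1, 0) (0, (pvT xs).1)) (((pvT xs).2.2 : Int), (pvT xs).2.1)).2
      = max (pvT xs).1 (pvT xs).2.1 := by
    unfold pvPick
    split_ifs <;> simp_all <;> omega
  have hfst : 0 < max (pvT xs).1 (pvT xs).2.1 →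
      (pvPick (pvPick (-1, 0) (0, (pvT xs).1)) (((pvT xs).2.2 : Int), (pvT xs).2.1)).1
      = (((if (pvT xs).2.1 ≤ (pvT xs).1 then 0 else (pvT xs).2.2 : Nat)) : Int) := by
    intro hc
    rw [lt_max_iff] at hc
    unfold pvPick
    split_ifs <;> simp_all <;> omega
  simp only [hscan, hmax, hidx, Option.getD_some, hsnd]
  by_cases hM : max (pvT xs).1 (pvT xs).2.1 > 1
  · rw [if_pos hM, if_pos hM, hfst (lt_trans zero_lt_one hM)]
  · rw [if_neg hM, if_neg hM]
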